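-- pv_equiv track=rewrite | github.com/X3no21/Mithras | mithras/src/target_methods_hooker/target_methods_hooker.py | java_type_to_dex_type
-- ===== SOURCE A (Python) =====
-- def java_type_to_dex_type(java_type):
--     mapping = {
--         'void': 'V',
--         'boolean': 'Z',
--         'byte': 'B',
--         'char': 'C',
--         'short': 'S',
--         'int': 'I',
--         'long': 'J',
--         'float': 'F',
--         'double': 'D'
--     }
--
--     if java_type.endswith('[]'):
--         return '[' + java_type_to_dex_type(java_type[:-2])
--
--     if java_type in mapping:
--         return mapping[java_type]
--
--     if '.' in java_type:
--         return f'L{java_type.replace(".", "/")};'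
--
--     return java_type
-- ===== SOURCE B (Python) =====
-- def java_type_to_dex_type(java_type):
--     mapping = {
--         'void': 'V',
--         'boolean': 'Z',
--         'byte': 'B',
--         'char': 'C',
--         'short': 'S',
--         'int': 'I',
--         'long': 'J',
--         'float': 'F',
--         'double': 'D'
--     }
--
--     dims = 0
--     while java_type.endswith('[]'):
--         java_type = java_type[:-2]
--         dims += 1
--
--     if java_type in mapping:
--         base = mapping[java_type]
--     elif '.' in java_type:
--         base = f'L{java_type.replace(".", "/")};'
--     else:
--         base = java_type
--     return '[' * dims + base
-- ===== Notes on version B (the rewrite author's own statement) =====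
-- stated objective: alternative
-- what changed: Replaces the per-array-level recursion (each level re-entering the whole function) with one iterative pass: a while loop strips bracket-pair suffixes counting dimensions, the base type is converted once, and the counted number of opening brackets is prepended.
import Mathlib
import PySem

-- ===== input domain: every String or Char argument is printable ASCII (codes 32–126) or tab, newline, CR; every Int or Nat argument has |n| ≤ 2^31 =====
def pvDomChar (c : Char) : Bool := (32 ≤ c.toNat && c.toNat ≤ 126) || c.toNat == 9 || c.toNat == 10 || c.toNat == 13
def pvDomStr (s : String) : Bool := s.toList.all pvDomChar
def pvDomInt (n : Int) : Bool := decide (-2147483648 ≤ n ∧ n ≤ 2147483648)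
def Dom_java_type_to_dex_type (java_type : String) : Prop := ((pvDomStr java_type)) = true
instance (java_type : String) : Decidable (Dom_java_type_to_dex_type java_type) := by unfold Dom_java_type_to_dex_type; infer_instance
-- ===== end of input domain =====

-- B replaces A's per-array-level recursion by an iterative strip-and-count loop followed by
-- a single base-type conversion; return values agree on all inputs (both are total).

-- the scalar-type mapping dict both Python versions contain verbatim (on code-point lists)
def jMapping : PySem.Dict (List Char) (List Char) :=
  PySem.Dict.ofList
    [("void".toList, "V".toList), ("boolean".toList, "Z".toList), ("byte".toList, "B".toList),
     ("char".toList, "C".toList), ("short".toList, "S".toList), ("int".toList, "I".toList),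
     ("long".toList, "J".toList), ("float".toList, "F".toList), ("double".toList, "D".toList)]

-- ===== PORT A =====
-- A's body on code-point lists: recursive case per '[]' suffix, then dict lookup, then the '.' case
def jA (s : List Char) : List Char :=
  if PySem.Chars.endswith s "[]".toList then
    '[' :: jA (PySem.List.slice s none (some (-2)))
  else
    match jMapping.get? s with
    | some v => v
    | none =>
      if PySem.Chars.isIn ".".toList s then
        'L' :: (PySem.Chars.replace s ".".toList "/".toList ++ ";".toList)
      else s
termination_by s.length
decreasing_by
  rw [PySem.List.slice_to_neg_ofNat s 2 (by omega)]
  have hsuf : "[]".toList <:+ s := (PySem.Chars.endswith_iff _ _).mp (by assumption)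
  have : 2 ≤ s.length := by simpa using hsuf.length_le
  simp [List.length_take]; omega

def java_type_to_dex_type (java_type : String) : String :=
  String.ofList (jA java_type.toList)

-- ===== PORT B =====
-- while java_type.endswith('[]'): strip two chars, count a dimension
def stripDims (s : List Char) : Nat × List Char :=
  if PySem.Chars.endswith s "[]".toList then
    let r := stripDims (PySem.List.slice s none (some (-2)))
    (r.1 + 1, r.2)
  else (0, s)
termination_by s.length
decreasing_by
  rw [PySem.List.slice_to_neg_ofNat s 2 (by omega)]
  have hsuf : "[]".toList <:+ s := (PySem.Chars.endswith_iff _ _).mp (by assumption)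
  have : 2 ≤ s.length := by simpa using hsuf.length_le
  simp [List.length_take]; omega

-- convert the stripped base type once
def jBase (s : List Char) : List Char :=
  match jMapping.get? s with
  | some v => v
  | none =>
    if PySem.Chars.isIn ".".toList s then
      'L' :: (PySem.Chars.replace s ".".toList "/".toList ++ ";".toList)
    else s

def java_type_to_dex_type_alt (java_type : String) : String :=
  let r := stripDims java_type.toList
  String.ofList (List.replicate r.1 '[' ++ jBase r.2)

-- ===== PRECONDITION & SPEC =====
def Spec_java_type_to_dex_type (java_type : String) (out : String) : Prop := out = java_type_to_dex_type_alt java_type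
instance (java_type : String) (out : String) : Decidable (Spec_java_type_to_dex_type java_type out) := by unfold Spec_java_type_to_dex_type; infer_instance

-- ===== CLAIM (what is proved, stated in full; the proofs are below) =====
def Claim_equal_java_type_to_dex_type : Prop := ∀ (java_type : String), Dom_java_type_to_dex_type java_type → Spec_java_type_to_dex_type java_type (java_type_to_dex_type java_type)

-- ===== LEMMAS AND PROOFS =====

-- the recursion and the loop compute the same list, by strong induction on the length
theorem jA_eq_strip (s : List Char) :
    jA s = List.replicate (stripDims s).1 '[' ++ jBase (stripDims s).2 := by
  by_cases h : PySem.Chars.endswith s "[]".toList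
  · have hsuf : "[]".toList <:+ s := (PySem.Chars.endswith_iff _ _).mp h
    have hlen : 2 ≤ s.length := by simpa using hsuf.length_le
    have hdec : (PySem.List.slice s none (some (-2))).length < s.length := by
      rw [PySem.List.slice_to_neg_ofNat s 2 (by omega)]
      simp [List.length_take]; omega
    rw [jA, stripDims, if_pos h, if_pos h]
    rw [jA_eq_strip (PySem.List.slice s none (some (-2)))]
    simp [List.replicate_succ]
  · rw [jA, stripDims, if_neg h, if_neg h]
    simp [jBase]
termination_by s.length
decreasing_by exact hdec

-- ===== VERDICT (by name: the statement is the Claim_ definition above) =====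
theorem java_type_to_dex_type_spec : Claim_equal_java_type_to_dex_type := by
  intro java_type _
  unfold Spec_java_type_to_dex_type java_type_to_dex_type java_type_to_dex_type_alt
  rw [jA_eq_strip]
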